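-- pv_equiv track=rewrite | github.com/aloofzebra03/Agentic-AI-For-Education | simulation_to_concept/streamlit_app/components/chat.py | format_teacher_message
-- ===== SOURCE A (Python) =====
-- def format_teacher_message(content: str) -> str:
--     """
--     Format teacher message for display.
--     Makes certain keywords stand out.
--
--     Args:
--         content: Raw message content
--
--     Returns:
--         Formatted message
--     """
--     # Highlight action words
--     formatted = content
--
--     # Make OBSERVE, PREDICT, EXPLAIN stand out
--     for keyword in ["OBSERVE:", "PREDICT:", "EXPLAIN:"]:
--         if keyword in formatted:
--             formatted = formatted.replace(
--                 keyword,
--                 f"**{keyword}**"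
--             )
--
--     return formatted
-- ===== SOURCE B (Python) =====
-- import re
--
-- _KEYWORD_RE = re.compile(r"(OBSERVE:|PREDICT:|EXPLAIN:)")
--
--
-- def format_teacher_message(content: str) -> str:
--     """
--     Format teacher message for display.
--     Makes certain keywords stand out.
--
--     Args:
--         content: Raw message content
--
--     Returns:
--         Formatted message
--     """
--     return _KEYWORD_RE.sub(r"**\1**", content)
-- ===== Notes on version B (the rewrite author's own statement) =====
-- stated objective: idiomatic
-- what changed: Replaced A's three sequential str.replace scans (each guarded by a membership test, each rebuilding the whole string) by a single compiled-regex pass that matches the alternation OBSERVE:|PREDICT:|EXPLAIN: left to right and wraps each match in ** once.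
import Mathlib
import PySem

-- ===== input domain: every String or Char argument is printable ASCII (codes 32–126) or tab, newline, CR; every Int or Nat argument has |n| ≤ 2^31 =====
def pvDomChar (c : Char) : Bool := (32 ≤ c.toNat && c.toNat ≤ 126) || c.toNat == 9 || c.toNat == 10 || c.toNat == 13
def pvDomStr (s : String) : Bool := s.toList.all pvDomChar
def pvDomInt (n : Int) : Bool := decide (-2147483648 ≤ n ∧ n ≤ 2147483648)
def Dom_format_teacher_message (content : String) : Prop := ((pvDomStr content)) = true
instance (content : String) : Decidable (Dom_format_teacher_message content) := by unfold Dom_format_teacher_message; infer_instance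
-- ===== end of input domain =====

-- B replaces A's three sequential str.replace passes by one left-to-right scan
-- (a compiled regex alternation in Python); idiomatic, return value identical.

-- ===== PORT A =====
-- A: for each keyword in order, if it occurs, replace it by **keyword**.
def format_teacher_message (content : String) : String :=
  ["OBSERVE:", "PREDICT:", "EXPLAIN:"].foldl
    (fun formatted keyword =>
      if PySem.Str.isIn keyword formatted then
        PySem.Str.replace formatted keyword ("**" ++ keyword ++ "**")
      else formatted)
    content

-- ===== PORT B =====
-- B: one scan; at each position try the alternation OBSERVE:|PREDICT:|EXPLAIN:
-- (re.sub semantics: leftmost match, alternatives in order), wrap the match in **.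
def altGo : List Char → List Char
  | [] => []
  | c :: t =>
    if List.isPrefixOf "OBSERVE:".toList (c :: t) then
      "**OBSERVE:**".toList ++ altGo (t.drop 7)
    else if List.isPrefixOf "PREDICT:".toList (c :: t) then
      "**PREDICT:**".toList ++ altGo (t.drop 7)
    else if List.isPrefixOf "EXPLAIN:".toList (c :: t) then
      "**EXPLAIN:**".toList ++ altGo (t.drop 7)
    else c :: altGo t
termination_by s => s.length
decreasing_by all_goals simp

def format_teacher_message_alt (content : String) : String :=
  String.ofList (altGo content.toList)

-- ===== PRECONDITION & SPEC =====
def Spec_format_teacher_message (content : String) (out : String) : Prop := out = format_teacher_message_alt content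
instance (content : String) (out : String) : Decidable (Spec_format_teacher_message content out) := by unfold Spec_format_teacher_message; infer_instance

-- ===== CLAIM (what is proved, stated in full; the proofs are below) =====
def Claim_equal_format_teacher_message : Prop := ∀ (content : String), Dom_format_teacher_message content → Spec_format_teacher_message content (format_teacher_message content)

-- ===== LEMMAS AND PROOFS =====

-- Structural recursion equivalent of PySem.Chars.replace (for old ≠ []).
def repF (old nw : List Char) : List Char → List Char
  | [] => []
  | c :: t =>
    if List.isPrefixOf old (c :: t) then nw ++ repF old nw (t.drop (old.length - 1))
    else c :: repF old nw t
termination_by s => s.length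
decreasing_by all_goals simp

theorem replace_go_eq (old nw : List Char) (h : old ≠ []) :
    ∀ fuel l acc, l.length ≤ fuel →
      PySem.Chars.replace.go old nw fuel l acc = acc.reverse ++ repF old nw l := by
  intro fuel
  induction fuel with
  | zero =>
    intro l acc hl
    have : l = [] := List.eq_nil_of_length_eq_zero (Nat.le_zero.mp hl)
    subst this
    simp [PySem.Chars.replace.go, repF]
  | succ n ih =>
    intro l acc hl
    cases l with
    | nil => simp [PySem.Chars.replace.go, repF]
    | cons c t =>
      by_cases hp : List.isPrefixOf old (c :: t)
      · rw [show PySem.Chars.replace.go old nw (n+1) (c :: t) acc =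
          (if old.isPrefixOf (c :: t) then
            PySem.Chars.replace.go old nw n (List.drop old.length (c :: t)) (nw.reverse ++ acc)
          else PySem.Chars.replace.go old nw n t (c :: acc)) from rfl]
        rw [if_pos hp]
        have hone : 0 < old.length := List.length_pos_of_ne_nil h
        have hlen : (List.drop old.length (c :: t)).length ≤ n := by
          simp at hl ⊢; omega
        rw [ih _ _ hlen]
        obtain ⟨a, old', rfl⟩ : ∃ a old'', old = a :: old'' := by
          cases old with | nil => exact absurd rfl h | cons a o => exact ⟨a, o, rfl⟩
        simp [repF, hp, List.drop_succ_cons]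
      · rw [show PySem.Chars.replace.go old nw (n+1) (c :: t) acc =
          (if old.isPrefixOf (c :: t) then
            PySem.Chars.replace.go old nw n (List.drop old.length (c :: t)) (nw.reverse ++ acc)
          else PySem.Chars.replace.go old nw n t (c :: acc)) from rfl]
        rw [if_neg hp]
        have : t.length ≤ n := by simp at hl; omega
        rw [ih _ _ this]
        simp [repF, hp]

theorem replace_eq_repF (s old nw : List Char) (h : old ≠ []) :
    PySem.Chars.replace s old nw = repF old nw s := by
  rw [PySem.Chars.replace]
  rw [if_neg (by simpa [List.isEmpty_iff] using h)]
  exact replace_go_eq old nw h s.length s [] le_rfl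

-- replace is the identity when old does not occur.
theorem repF_eq_self (old nw : List Char) (s : List Char) (h : ¬ old <:+: s) :
    repF old nw s = s := by
  induction s with
  | nil => simp [repF]
  | cons c t ih =>
    have hp : ¬ List.isPrefixOf old (c :: t) := by
      intro hc
      exact h (List.isPrefixOf_iff_prefix.mp hc).isInfix
    rw [repF, if_neg hp]
    have : ¬ old <:+: t := fun hi => h (hi.trans (List.suffix_cons c t).isInfix)
    rw [ih this]

-- A star-free pattern that is a prefix of (repF old nw u) with nw beginning in '*'
-- was already a prefix of u.
theorem starfree_prefix (old nw' : List Char) :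
    ∀ (u p : List Char), ('*' ∉ p) → p <+: repF old ('*' :: nw') u → p <+: u := by
  intro u
  induction u with
  | nil => intro p _ hp; simpa [repF] using hp
  | cons c t ih =>
    intro p hstar hp
    cases p with
    | nil => exact List.nil_prefix
    | cons q p' =>
      by_cases hm : List.isPrefixOf old (c :: t)
      · rw [repF, if_pos hm] at hp
        rw [List.cons_append] at hp
        have : q = '*' := (List.cons_prefix_cons.mp hp).1
        exact absurd (this ▸ List.mem_cons_self) hstar
      · rw [repF, if_neg hm] at hp
        obtain ⟨hq, hp'⟩ := (List.cons_prefix_cons).mp hp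
        have := ih p' (fun hx => hstar (List.mem_cons_of_mem _ hx)) hp'
        exact List.cons_prefix_cons.mpr ⟨hq, this⟩

-- Abbreviations for the three replace passes (A does them in this order).
def repO : List Char → List Char := repF "OBSERVE:".toList "**OBSERVE:**".toList
def repP : List Char → List Char := repF "PREDICT:".toList "**PREDICT:**".toList
def repE : List Char → List Char := repF "EXPLAIN:".toList "**EXPLAIN:**".toList

-- Matching head chunks.
theorem repO_match (u : List Char) :
    repO ("OBSERVE:".toList ++ u) = "**OBSERVE:**".toList ++ repO u := by
  show repF _ _ ('O'::'B'::'S'::'E'::'R'::'V'::'E'::':':: u) = _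
  rw [repO, repF, if_pos (by simp [List.isPrefixOf])]
  simp

theorem repP_match (u : List Char) :
    repP ("PREDICT:".toList ++ u) = "**PREDICT:**".toList ++ repP u := by
  show repF _ _ ('P'::'R'::'E'::'D'::'I'::'C'::'T'::':':: u) = _
  rw [repP, repF, if_pos (by simp [List.isPrefixOf])]
  simp

theorem repE_match (u : List Char) :
    repE ("EXPLAIN:".toList ++ u) = "**EXPLAIN:**".toList ++ repE u := by
  show repF _ _ ('E'::'X'::'P'::'L'::'A'::'I'::'N'::':':: u) = _
  rw [repE, repF, if_pos (by simp [List.isPrefixOf])]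
  simp

-- Non-matching chunks commute past the other passes.
theorem repP_wO (u : List Char) :
    repP ("**OBSERVE:**".toList ++ u) = "**OBSERVE:**".toList ++ repP u := by
  show repF _ _ ('*'::'*'::'O'::'B'::'S'::'E'::'R'::'V'::'E'::':'::'*'::'*':: u) = _
  simp [repP, repF, List.isPrefixOf]

theorem repE_wO (u : List Char) :
    repE ("**OBSERVE:**".toList ++ u) = "**OBSERVE:**".toList ++ repE u := by
  show repF _ _ ('*'::'*'::'O'::'B'::'S'::'E'::'R'::'V'::'E'::':'::'*'::'*':: u) = _
  simp [repE, repF, List.isPrefixOf]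

theorem repE_wP (u : List Char) :
    repE ("**PREDICT:**".toList ++ u) = "**PREDICT:**".toList ++ repE u := by
  show repF _ _ ('*'::'*'::'P'::'R'::'E'::'D'::'I'::'C'::'T'::':'::'*'::'*':: u) = _
  simp [repE, repF, List.isPrefixOf]

theorem repO_kP (u : List Char) :
    repO ("PREDICT:".toList ++ u) = "PREDICT:".toList ++ repO u := by
  show repF _ _ ('P'::'R'::'E'::'D'::'I'::'C'::'T'::':':: u) = _
  simp [repO, repF, List.isPrefixOf]

theorem repO_kE (u : List Char) :
    repO ("EXPLAIN:".toList ++ u) = "EXPLAIN:".toList ++ repO u := by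
  show repF _ _ ('E'::'X'::'P'::'L'::'A'::'I'::'N'::':':: u) = _
  simp [repO, repF, List.isPrefixOf]

theorem repP_kE (u : List Char) :
    repP ("EXPLAIN:".toList ++ u) = "EXPLAIN:".toList ++ repP u := by
  show repF _ _ ('E'::'X'::'P'::'L'::'A'::'I'::'N'::':':: u) = _
  simp [repP, repF, List.isPrefixOf]

-- altGo on the three chunks.
theorem altGo_kO (u : List Char) :
    altGo ("OBSERVE:".toList ++ u) = "**OBSERVE:**".toList ++ altGo u := by
  show altGo ('O'::'B'::'S'::'E'::'R'::'V'::'E'::':':: u) = _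
  rw [altGo, if_pos (by simp [List.isPrefixOf])]
  simp

theorem altGo_kP (u : List Char) :
    altGo ("PREDICT:".toList ++ u) = "**PREDICT:**".toList ++ altGo u := by
  show altGo ('P'::'R'::'E'::'D'::'I'::'C'::'T'::':':: u) = _
  rw [altGo, if_neg (by simp [List.isPrefixOf]), if_pos (by simp [List.isPrefixOf])]
  simp

theorem altGo_kE (u : List Char) :
    altGo ("EXPLAIN:".toList ++ u) = "**EXPLAIN:**".toList ++ altGo u := by
  show altGo ('E'::'X'::'P'::'L'::'A'::'I'::'N'::':':: u) = _
  rw [altGo, if_neg (by simp [List.isPrefixOf]), if_neg (by simp [List.isPrefixOf]),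
      if_pos (by simp [List.isPrefixOf])]
  simp

-- The main induction: three sequential passes = one scan.
theorem main_eq : ∀ (n : Nat) (s : List Char), s.length ≤ n →
    repE (repP (repO s)) = altGo s := by
  intro n
  induction n with
  | zero =>
    intro s hs
    have : s = [] := List.eq_nil_of_length_eq_zero (Nat.le_zero.mp hs)
    subst this
    simp [repO, repP, repE, repF, altGo]
  | succ n ih =>
    intro s hs
    cases s with
    | nil => simp [repO, repP, repE, repF, altGo]
    | cons c t =>
      by_cases hO : List.isPrefixOf "OBSERVE:".toList (c :: t)
      · obtain ⟨u, hu⟩ := List.isPrefixOf_iff_prefix.mp hO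
        rw [← hu] at hs ⊢
        have hun : u.length ≤ n := by simp at hs; omega
        rw [repO_match, repP_wO, repE_wO, altGo_kO, ih u hun]
      · by_cases hP : List.isPrefixOf "PREDICT:".toList (c :: t)
        · obtain ⟨u, hu⟩ := List.isPrefixOf_iff_prefix.mp hP
          rw [← hu] at hs ⊢
          have hun : u.length ≤ n := by simp at hs; omega
          rw [repO_kP, repP_match, repE_wP, altGo_kP, ih u hun]
        · by_cases hE : List.isPrefixOf "EXPLAIN:".toList (c :: t)
          · obtain ⟨u, hu⟩ := List.isPrefixOf_iff_prefix.mp hE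
            rw [← hu] at hs ⊢
            have hun : u.length ≤ n := by simp at hs; omega
            rw [repO_kE, repP_kE, repE_match, altGo_kE, ih u hun]
          · -- no keyword matches at the head
            have htn : t.length ≤ n := by simp at hs; omega
            have h1 : repO (c :: t) = c :: repO t := by
              rw [repO, repF, if_neg hO]
            have hP2 : ¬ List.isPrefixOf "PREDICT:".toList (c :: repO t) := by
              intro h
              have hpre := List.isPrefixOf_iff_prefix.mp h
              rw [show ("PREDICT:".toList) = 'P' :: "REDICT:".toList from rfl,
                  List.cons_prefix_cons] at hpre
              obtain ⟨hc, hrest⟩ := hpre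
              have hrt : "REDICT:".toList <+: t :=
                starfree_prefix "OBSERVE:".toList "*OBSERVE:**".toList t _
                  (by decide) hrest
              exact hP (List.isPrefixOf_iff_prefix.mpr
                (by rw [show ("PREDICT:".toList) = 'P' :: "REDICT:".toList from rfl,
                        List.cons_prefix_cons]; exact ⟨hc, hrt⟩))
            have h2 : repP (c :: repO t) = c :: repP (repO t) := by
              rw [repP, repF, if_neg hP2]
            have hE2 : ¬ List.isPrefixOf "EXPLAIN:".toList (c :: repP (repO t)) := by
              intro h
              have hpre := List.isPrefixOf_iff_prefix.mp h
              rw [show ("EXPLAIN:".toList) = 'E' :: "XPLAIN:".toList from rfl,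
                  List.cons_prefix_cons] at hpre
              obtain ⟨hc, hrest⟩ := hpre
              have hr1 : "XPLAIN:".toList <+: repO t :=
                starfree_prefix "PREDICT:".toList "*PREDICT:**".toList _ _
                  (by decide) hrest
              have hr2 : "XPLAIN:".toList <+: t :=
                starfree_prefix "OBSERVE:".toList "*OBSERVE:**".toList t _
                  (by decide) hr1
              exact hE (List.isPrefixOf_iff_prefix.mpr
                (by rw [show ("EXPLAIN:".toList) = 'E' :: "XPLAIN:".toList from rfl,
                        List.cons_prefix_cons]; exact ⟨hc, hr2⟩))
            have h3 : repE (c :: repP (repO t)) = c :: repE (repP (repO t)) := by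
              rw [repE, repF, if_neg hE2]
            rw [h1, h2, h3, ih t htn, altGo, if_neg hO, if_neg hP, if_neg hE]

-- One String-level step of A's loop, on toList.
theorem step_toList (s k : String) (hk : k.toList ≠ []) :
    (if PySem.Str.isIn k s then PySem.Str.replace s k ("**" ++ k ++ "**") else s).toList
      = repF k.toList ("**" ++ k ++ "**").toList s.toList := by
  by_cases h : PySem.Str.isIn k s
  · rw [if_pos h, PySem.Str.toList_replace, replace_eq_repF _ _ _ hk]
  · rw [if_neg h]
    refine (repF_eq_self _ _ _ ?_).symm
    intro hi
    exact h ((PySem.Str.isIn_iff_infix _ _).mpr hi)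

-- ===== VERDICT (by name: the statement is the Claim_ definition above) =====
theorem format_teacher_message_spec : Claim_equal_format_teacher_message := by
  intro content _
  show format_teacher_message content = format_teacher_message_alt content
  have hA : (format_teacher_message content).toList
      = repE (repP (repO content.toList)) := by
    rw [format_teacher_message]
    simp only [List.foldl]
    rw [step_toList _ "EXPLAIN:" (by decide), step_toList _ "PREDICT:" (by decide),
        step_toList _ "OBSERVE:" (by decide)]
    rfl
  have hB : (format_teacher_message_alt content).toList = altGo content.toList := by
    rw [format_teacher_message_alt]
    simp
  have := main_eq content.toList.length content.toList le_rfl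
  have hlist : (format_teacher_message content).toList
      = (format_teacher_message_alt content).toList := by
    rw [hA, hB, this]
  calc format_teacher_message content
      = String.ofList (format_teacher_message content).toList := by simp
    _ = String.ofList (format_teacher_message_alt content).toList := by rw [hlist]
    _ = format_teacher_message_alt content := by simp
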